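-- pv_equiv track=rewrite | github.com/mnajafian-nv/nat-agent-lab | gaia_tools/src/gaia_tools/register.py | _flip_fen_perspective
-- ===== SOURCE A (Python) =====
-- def _flip_fen_perspective(fen_placement: str) -> str:
--     """Rotate a FEN piece-placement string 180 degrees.
--
--     Handles the case where the vision model read a board shown from Black's
--     perspective but assumed White's perspective (row 8 top, column a left).
--     """
--     rows = fen_placement.split("/")
--     flipped = []
--     for row in reversed(rows):
--         expanded = []
--         for ch in row:
--             if ch.isdigit():
--                 expanded.extend(["."] * int(ch))
--             else:
--                 expanded.append(ch)
--         expanded.reverse()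
--         compressed: list[str] = []
--         empty = 0
--         for ch in expanded:
--             if ch == ".":
--                 empty += 1
--             else:
--                 if empty:
--                     compressed.append(str(empty))
--                     empty = 0
--                 compressed.append(ch)
--         if empty:
--             compressed.append(str(empty))
--         flipped.append("".join(compressed))
--     return "/".join(flipped)
-- ===== SOURCE B (Python) =====
-- def _flip_fen_perspective(fen_placement: str) -> str:
--     # Rotating the board 180 degrees = reversing the whole placement string
--     # (row order and file order both flip, '/' separators stay separators);
--     # runs of empty squares ('.' cells or digit counts) are re-summed on the fly.
--     out = []
--     empty = 0
--     for ch in reversed(fen_placement):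
--         if ch == ".":
--             empty += 1
--         elif ch.isdigit():
--             empty += int(ch)
--         else:
--             if empty:
--                 out.append(str(empty))
--                 empty = 0
--             out.append(ch)
--     if empty:
--         out.append(str(empty))
--     return "".join(out)
-- ===== Notes on version B (the rewrite author's own statement) =====
-- stated objective: simpler
-- what changed: B replaces A's split-into-rows / expand-each-digit-to-dots / reverse / recompress pipeline by one single pass over the reversed string that sums runs of empty squares ('.' cells and digit counts) on the fly, never materialising the expanded board.
import Mathlib
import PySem

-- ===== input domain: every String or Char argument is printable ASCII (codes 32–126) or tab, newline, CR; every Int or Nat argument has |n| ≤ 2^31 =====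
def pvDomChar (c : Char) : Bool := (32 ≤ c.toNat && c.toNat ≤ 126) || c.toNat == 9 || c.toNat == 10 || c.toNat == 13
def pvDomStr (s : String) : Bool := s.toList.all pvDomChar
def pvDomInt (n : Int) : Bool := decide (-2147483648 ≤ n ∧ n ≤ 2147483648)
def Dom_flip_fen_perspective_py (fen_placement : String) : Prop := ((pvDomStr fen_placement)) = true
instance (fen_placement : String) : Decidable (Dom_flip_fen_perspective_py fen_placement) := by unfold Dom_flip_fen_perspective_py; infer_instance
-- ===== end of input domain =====

-- B rotates the board by one single pass over the reversed string (no split / expand-to-dots / recompress),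
-- summing runs of empty squares ('.' cells and digit counts) on the fly; objective: simpler.

-- ===== PORT A =====
-- int(ch) for a character with ch.isdigit() true — exact, since PySem.Chars.isdigit ch means '0' ≤ ch ≤ '9'
def pvDigitVal (ch : Char) : Nat := ch.toNat - 48

-- body of A's expansion loop: expanded.extend(["."] * int(ch)) / expanded.append(ch)
def pvExpandStep (acc : List Char) (ch : Char) : List Char :=
  if PySem.Chars.isdigit ch then acc ++ List.replicate (pvDigitVal ch) '.'
  else acc ++ [ch]

-- body of A's compression loop; state = (compressed joined as chars, empty)
def pvCompressStep (st : List Char × Nat) (ch : Char) : List Char × Nat :=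
  if ch = '.' then (st.1, st.2 + 1)
  else if st.2 ≠ 0 then (st.1 ++ PySem.Int.toChars (st.2 : Int) ++ [ch], 0)
  else (st.1 ++ [ch], 0)

-- trailing "if empty: compressed.append(str(empty))" (same code in A and in B)
def pvFlush (st : List Char × Nat) : List Char :=
  if st.2 ≠ 0 then st.1 ++ PySem.Int.toChars (st.2 : Int) else st.1

-- A's per-row body: expand, reverse, compress, flush
def pvFlipRowA (row : List Char) : List Char :=
  let expanded := row.foldl pvExpandStep []
  pvFlush (expanded.reverse.foldl pvCompressStep ([], 0))

def flip_fen_perspective_py (fen_placement : String) : String :=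
  let rows := PySem.Chars.splitOn fen_placement.toList ['/']
  let flipped := rows.reverse.foldl (fun acc row => acc ++ [pvFlipRowA row]) []
  String.ofList (PySem.Chars.join ['/'] flipped)

-- ===== PORT B =====
-- body of B's single loop over reversed(fen_placement); state = (out joined as chars, empty)
def pvBStep (st : List Char × Nat) (ch : Char) : List Char × Nat :=
  if ch = '.' then (st.1, st.2 + 1)
  else if PySem.Chars.isdigit ch then (st.1, st.2 + pvDigitVal ch)
  else if st.2 ≠ 0 then (st.1 ++ PySem.Int.toChars (st.2 : Int) ++ [ch], 0)
  else (st.1 ++ [ch], 0)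

def flip_fen_perspective_py_alt (fen_placement : String) : String :=
  String.ofList (pvFlush (fen_placement.toList.reverse.foldl pvBStep ([], 0)))

-- ===== PRECONDITION & SPEC =====
def Spec_flip_fen_perspective_py (fen_placement : String) (out : String) : Prop := out = flip_fen_perspective_py_alt fen_placement
instance (fen_placement : String) (out : String) : Decidable (Spec_flip_fen_perspective_py fen_placement out) := by unfold Spec_flip_fen_perspective_py; infer_instance

-- ===== CLAIM (what is proved, stated in full; the proofs are below) =====
def Claim_equal_flip_fen_perspective_py : Prop := ∀ (fen_placement : String), Dom_flip_fen_perspective_py fen_placement → Spec_flip_fen_perspective_py fen_placement (flip_fen_perspective_py fen_placement)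

-- ===== LEMMAS AND PROOFS =====

-- recursive single-char split on '/', the value of PySem.Chars.splitOn · ['/']
def pvConsHead (x : List Char) : List (List Char) → List (List Char)
  | [] => [x]
  | h :: t => (x ++ h) :: t

def pvSplitSlash : List Char → List (List Char)
  | [] => [[]]
  | c :: rest => if c = '/' then [] :: pvSplitSlash rest else pvConsHead [c] (pvSplitSlash rest)

theorem pvSplitSlash_ne_nil (l : List Char) : pvSplitSlash l ≠ [] := by
  cases l with
  | nil => simp [pvSplitSlash]
  | cons c rest =>
    simp only [pvSplitSlash]
    split
    · simp
    · cases h : pvSplitSlash rest <;> simp [pvConsHead]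

theorem pvConsHead_append (x y : List Char) (zs : List (List Char)) :
    pvConsHead (x ++ y) zs = pvConsHead x (pvConsHead y zs) := by
  cases zs <;> simp [pvConsHead]

theorem pvSplitOn_go (fuel : Nat) (l cur : List Char) (acc : List (List Char))
    (h : l.length ≤ fuel) :
    PySem.Chars.splitOn.go ['/'] fuel l cur acc
      = acc.reverse ++ pvConsHead cur.reverse (pvSplitSlash l) := by
  induction l generalizing fuel cur acc with
  | nil =>
    cases fuel <;> simp [PySem.Chars.splitOn.go, pvSplitSlash, pvConsHead]
  | cons c rest ih =>
    cases fuel with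
    | zero => simp at h
    | succ f =>
      simp only [PySem.Chars.splitOn.go]
      by_cases hc : c = '/'
      · subst hc
        have hpre : List.isPrefixOf ['/'] ('/' :: rest) = true := by
          simp [List.isPrefixOf]
        simp only [hpre, if_pos]
        rw [show List.drop ['/'].length ('/' :: rest) = rest from rfl]
        rw [ih f [] (cur.reverse :: acc) (by simpa using Nat.le_of_succ_le_succ h)]
        cases hs : pvSplitSlash rest with
        | nil => exact absurd hs (pvSplitSlash_ne_nil rest)
        | cons h' t =>
          simp [pvSplitSlash, hs, pvConsHead]
      · have hpre : List.isPrefixOf ['/'] (c :: rest) = false := by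
          simp [List.isPrefixOf]
          intro hcontra; exact hc hcontra.symm
        simp only [hpre, Bool.false_eq_true, if_false]
        rw [ih f (c :: cur) acc (by simpa using Nat.le_of_succ_le_succ h)]
        simp [pvSplitSlash, hc, pvConsHead_append]

theorem pvSplitOn_eq (l : List Char) :
    PySem.Chars.splitOn l ['/'] = pvSplitSlash l := by
  unfold PySem.Chars.splitOn
  rw [pvSplitOn_go (l.length + 1) l [] [] (by omega)]
  cases hs : pvSplitSlash l with
  | nil => exact absurd hs (pvSplitSlash_ne_nil l)
  | cons h t => simp [pvConsHead]

theorem pvJoin_consHead (x h : List Char) (t : List (List Char)) :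
    PySem.Chars.join ['/'] (pvConsHead x (h :: t)) = x ++ PySem.Chars.join ['/'] (h :: t) := by
  cases t with
  | nil => simp [pvConsHead, PySem.Chars.join, List.intercalate]
  | cons b r =>
    simp [pvConsHead, PySem.Chars.join_cons_cons]

theorem pvJoin_splitSlash (l : List Char) :
    PySem.Chars.join ['/'] (pvSplitSlash l) = l := by
  induction l with
  | nil => simp [pvSplitSlash, PySem.Chars.join, List.intercalate]
  | cons c rest ih =>
    simp only [pvSplitSlash]
    by_cases hc : c = '/'
    · subst hc
      cases hs : pvSplitSlash rest with
      | nil => exact absurd hs (pvSplitSlash_ne_nil rest)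
      | cons h t =>
        rw [hs] at ih
        simp [PySem.Chars.join_cons_cons, ih]
    · rw [if_neg hc]
      cases hs : pvSplitSlash rest with
      | nil => exact absurd hs (pvSplitSlash_ne_nil rest)
      | cons h t =>
        rw [pvJoin_consHead, ← hs, ih]
        simp

theorem pvJoin_append_singleton (xs : List (List Char)) (y : List Char) (hxs : xs ≠ []) :
    PySem.Chars.join ['/'] (xs ++ [y]) = PySem.Chars.join ['/'] xs ++ '/' :: y := by
  induction xs with
  | nil => exact absurd rfl hxs
  | cons a r ih =>
    cases r with
    | nil => simp [PySem.Chars.join, List.intercalate]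
    | cons b t =>
      rw [show (a :: b :: t) ++ [y] = a :: ((b :: t) ++ [y]) from by simp]
      rw [show a :: ((b :: t) ++ [y]) = a :: b :: (t ++ [y]) from by simp]
      rw [PySem.Chars.join_cons_cons]
      rw [show b :: (t ++ [y]) = (b :: t) ++ [y] from by simp]
      rw [ih (by simp), PySem.Chars.join_cons_cons]
      simp

theorem pvReverse_join (rs : List (List Char)) :
    (PySem.Chars.join ['/'] rs).reverse = PySem.Chars.join ['/'] (rs.reverse.map List.reverse) := by
  induction rs with
  | nil => simp [PySem.Chars.join, List.intercalate]
  | cons a r ih =>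
    cases r with
    | nil => simp [PySem.Chars.join, List.intercalate]
    | cons b t =>
      rw [PySem.Chars.join_cons_cons, List.reverse_cons, List.map_append, List.map_singleton]
      rw [pvJoin_append_singleton _ _ (by simp), ← ih]
      simp

-- B's fold only ever appends to the output component
theorem pvBfold_prefix (xs : List Char) (out o : List Char) (e : Nat) :
    xs.foldl pvBStep (out ++ o, e)
      = (out ++ (xs.foldl pvBStep (o, e)).1, (xs.foldl pvBStep (o, e)).2) := by
  induction xs generalizing o e with
  | nil => simp
  | cons c rest ih =>
    simp only [List.foldl_cons]
    have hstep : pvBStep (out ++ o, e) c = (out ++ (pvBStep (o, e) c).1, (pvBStep (o, e) c).2) := by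
      unfold pvBStep; split_ifs <;> simp
    rw [hstep]
    exact ih _ _

theorem pvFlush_prefix (out o : List Char) (e : Nat) :
    pvFlush (out ++ o, e) = out ++ pvFlush (o, e) := by
  unfold pvFlush; split_ifs <;> simp

-- B's fold distributes over '/'-joined pieces
theorem pvBfold_join (rs : List (List Char)) :
    pvFlush ((PySem.Chars.join ['/'] rs).foldl pvBStep ([], 0))
      = PySem.Chars.join ['/'] (rs.map (fun r => pvFlush (r.foldl pvBStep ([], 0)))) := by
  induction rs with
  | nil => simp [PySem.Chars.join, List.intercalate, pvFlush]
  | cons a r ih =>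
    cases r with
    | nil => simp [PySem.Chars.join, List.intercalate]
    | cons b t =>
      rw [PySem.Chars.join_cons_cons, List.map_cons, List.map_cons, PySem.Chars.join_cons_cons]
      rw [show a ++ ['/'] ++ PySem.Chars.join ['/'] (b :: t)
            = a ++ ('/' :: PySem.Chars.join ['/'] (b :: t)) from by simp]
      rw [List.foldl_append]
      have hstep : pvBStep (a.foldl pvBStep ([], 0)) '/'
          = (pvFlush (a.foldl pvBStep ([], 0)) ++ ['/'], 0) := by
        unfold pvBStep pvFlush
        have h1 : ¬ ('/' = '.') := by decide
        have h2 : PySem.Chars.isdigit '/' = false := by decide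
        split_ifs <;> simp_all
      rw [List.foldl_cons, hstep]
      have := pvBfold_prefix (PySem.Chars.join ['/'] (b :: t))
        (pvFlush (a.foldl pvBStep ([], 0)) ++ ['/']) [] 0
      simp only [List.append_nil] at this
      rw [this, pvFlush_prefix]
      rw [ih]
      simp

-- A's expansion as a flatMap
def pvPiece (ch : Char) : List Char :=
  if PySem.Chars.isdigit ch then List.replicate (pvDigitVal ch) '.' else [ch]

theorem pvExpand_eq_flatMap (row : List Char) (acc : List Char) :
    row.foldl pvExpandStep acc = acc ++ row.flatMap pvPiece := by
  induction row generalizing acc with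
  | nil => simp
  | cons c rest ih =>
    simp only [List.foldl_cons, List.flatMap_cons]
    rw [ih]
    unfold pvExpandStep pvPiece
    split_ifs <;> simp

theorem pvPiece_reverse (ch : Char) : (pvPiece ch).reverse = pvPiece ch := by
  unfold pvPiece; split_ifs <;> simp

theorem pvCompress_replicate (d : Nat) (st : List Char × Nat) :
    (List.replicate d '.').foldl pvCompressStep st = (st.1, st.2 + d) := by
  induction d generalizing st with
  | zero => simp
  | succ n ih =>
    rw [List.replicate_succ, List.foldl_cons]
    rw [show pvCompressStep st '.' = (st.1, st.2 + 1) from by unfold pvCompressStep; simp]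
    rw [ih]
    simp [Nat.add_assoc, Nat.add_comm 1 n]

-- compressing the expansion = B's direct summing pass
theorem pvCompress_flatMap (zs : List Char) (st : List Char × Nat) :
    (zs.flatMap pvPiece).foldl pvCompressStep st = zs.foldl pvBStep st := by
  induction zs generalizing st with
  | nil => simp
  | cons c rest ih =>
    rw [List.flatMap_cons, List.foldl_append, List.foldl_cons]
    by_cases hd : PySem.Chars.isdigit c
    · have hcdot : ¬ (c = '.') := by
        intro h; subst h; simp [PySem.Chars.isdigit] at hd
      rw [show pvPiece c = List.replicate (pvDigitVal c) '.' from by simp [pvPiece, hd]]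
      rw [pvCompress_replicate]
      rw [show pvBStep st c = (st.1, st.2 + pvDigitVal c) from by
        simp [pvBStep, hcdot, hd]]
      exact ih _
    · rw [show pvPiece c = [c] from by simp [pvPiece, hd]]
      rw [List.foldl_cons, List.foldl_nil]
      have : pvCompressStep st c = pvBStep st c := by
        unfold pvCompressStep pvBStep
        by_cases hc : c = '.' <;> simp [hc, hd]
      rw [this]
      exact ih _

-- A's per-row work equals B's single reversed pass over the row
theorem pvFlipRowA_eq (row : List Char) :
    pvFlipRowA row = pvFlush (row.reverse.foldl pvBStep ([], 0)) := by
  unfold pvFlipRowA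
  rw [pvExpand_eq_flatMap row []]
  simp only [List.nil_append]
  rw [List.reverse_flatMap]
  simp only [Function.comp_def]
  have : (row.reverse.flatMap fun x => (pvPiece x).reverse) = row.reverse.flatMap pvPiece := by
    apply List.flatMap_congr
    intro x _
    exact pvPiece_reverse x
  rw [this, pvCompress_flatMap]

-- ===== VERDICT (by name: the statement is the Claim_ definition above) =====
theorem flip_fen_perspective_py_spec : Claim_equal_flip_fen_perspective_py := by
  intro fen _
  unfold Spec_flip_fen_perspective_py flip_fen_perspective_py flip_fen_perspective_py_alt
  simp only [pvSplitOn_eq, PySem.List.foldl_append_singleton_eq_map]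
  congr 1
  have hrev : fen.toList.reverse
      = PySem.Chars.join ['/'] ((pvSplitSlash fen.toList).reverse.map List.reverse) := by
    rw [← pvReverse_join, pvJoin_splitSlash]
  rw [hrev, pvBfold_join, List.map_map]
  simp only [List.nil_append, Function.comp_def]
  refine congrArg (PySem.Chars.join ['/']) ?_
  apply List.map_congr_left
  intro r _
  exact pvFlipRowA_eq r
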